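-- pv_equiv track=rewrite | github.com/romhack/sonic_riders_lzss | sonic_riders_lzss.py | find_lz
-- ===== SOURCE A (Python) =====
-- from typing import NamedTuple
--
-- class LzEntry(NamedTuple):
--     distance: int  # offset back in unpacked buffer, 8 bits
--     length: int  # copy count, 8 bits
--
-- MAX_OFFSET = 0xFF  # lz offset is encoded with 8 bits
--
-- MAX_LEN = 0xFF  # lz length is encoded with 8 bits
--
-- def find_lz(lst, pos):
--     '''
--     find best lz match for given position and haystack list
--
--     Parameters
--     ----------
--     lst : list of ints
--         full plain file
--     pos : int
--         position in plain file to search an lz match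
--
--     Returns
--     -------
--     LzEntry or None
--         found best lz entry for this position, if not found, return None
--
--     '''
--     def common_start_len(lst, hay_start, pos):
--         count = 0
--         while count < MAX_LEN and pos < len(lst) and lst[hay_start] == lst[pos]:
--             hay_start += 1
--             pos += 1
--             count += 1
--         return count
--
--     assert lst and pos < len(
--         lst), "find_lz: position out of bounds or empty list!"
--     candidates = []
--     # max offset back is 0xFF, haystack start from pos-0xFF, trimmed by 0
--     for hay_start in range(max(0, pos-MAX_OFFSET), pos):
--         common_len = common_start_len(lst, hay_start, pos)
--         if common_len >= 2:  # minimal efficient entry is 2 bytes long lz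
--             candidates.append(
--                 LzEntry(distance=pos-hay_start, length=common_len))
--     # compare candidates first by length, next by earliest occurence
--     best = max(candidates, key=lambda ent: (ent.length, ent.distance),
--                default=None)
--
--     return best
-- ===== SOURCE B (Python) =====
-- MAX_OFFSET = 0xFF  # lz offset is encoded with 8 bits
-- MAX_LEN = 0xFF  # lz length is encoded with 8 bits
--
--
-- def find_lz(lst, pos):
--     '''length-major search: keep the set of window starts whose match still
--     survives, lengthening the required match one byte at a time until no
--     start survives; ties in length resolve to the farthest (smallest) start.'''
--     assert lst and pos < len(
--         lst), "find_lz: position out of bounds or empty list!"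
--     survivors = list(range(max(0, pos - MAX_OFFSET), pos))
--     tlen = min(MAX_LEN, len(lst) - pos)
--     n = 0
--     best_len = 0
--     best_start = None
--     while n < tlen and survivors:
--         c = lst[pos + n]
--         nxt = [h for h in survivors if lst[h + n] == c]
--         if not nxt:
--             break
--         n += 1
--         survivors = nxt
--         best_len, best_start = n, survivors[0]
--     if best_len < 2:
--         return None
--     return (pos - best_start, best_len)
-- ===== Notes on version B (the rewrite author's own statement) =====
-- stated objective: alternative
-- what changed: Replaces A's start-major scan (extend a match at every window start, collect candidates, max(key)) by a length-major search: one shrinking survivor set of window starts filtered one required byte at a time, the answer read off as the last non-empty set's first element; no per-start extension loop and no candidate list/max step.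
import Mathlib
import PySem

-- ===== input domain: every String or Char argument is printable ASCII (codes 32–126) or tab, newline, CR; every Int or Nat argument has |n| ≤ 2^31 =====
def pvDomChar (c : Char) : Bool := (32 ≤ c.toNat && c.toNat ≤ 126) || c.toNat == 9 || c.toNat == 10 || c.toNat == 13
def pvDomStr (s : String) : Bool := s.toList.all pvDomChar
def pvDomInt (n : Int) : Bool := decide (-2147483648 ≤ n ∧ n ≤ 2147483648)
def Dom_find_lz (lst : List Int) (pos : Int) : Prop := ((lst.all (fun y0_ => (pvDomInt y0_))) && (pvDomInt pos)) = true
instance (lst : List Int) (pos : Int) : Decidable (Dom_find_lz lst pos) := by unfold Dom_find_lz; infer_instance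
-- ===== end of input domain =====

-- B replaces A's start-major scan (per-start extension loop + candidate list + max(key)) by a
-- length-major survivor-set search, reading the answer off the last non-empty set (alternative).


-- ===== PORT A =====
-- inner while loop of common_start_len: count, hay_start, pos all advance by 1 while the
-- guard holds; lst[hay_start] == lst[pos] is exact via pyGet? (both indexes are in range
-- whenever the guard pos < len(lst) holds and the caller passes 0 ≤ hay_start < pos)
def find_lz_csl (lst : List Int) (hay_start pos count : Int) : Int :=
  if h : count < 255 ∧ pos < (lst.length : Int) ∧
      PySem.List.pyGet? lst hay_start = PySem.List.pyGet? lst pos then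
    find_lz_csl lst (hay_start + 1) (pos + 1) (count + 1)
  else count
termination_by (255 - count).toNat
decreasing_by simp only [Int.lt_iff_add_one_le] at h; omega

def find_lz (lst : List Int) (pos : Int) : Option (Int × Int) :=
  if lst ≠ [] ∧ pos < (lst.length : Int) then
    -- for hay_start in range(max(0, pos-MAX_OFFSET), pos): append (distance, length) if length >= 2
    let candidates := (PySem.List.pyRange (max 0 (pos - 255)) pos 1).foldl
      (fun acc hay_start =>
        if 2 ≤ find_lz_csl lst hay_start pos 0 then
          acc ++ [(pos - hay_start, find_lz_csl lst hay_start pos 0)]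
        else acc) []
    -- max(candidates, key=lambda ent: (ent.length, ent.distance), default=None)
    PySem.List.max2? candidates (fun ent => ent.2) (fun ent => ent.1)
  else none  -- the assert raises here; outside Pre_find_lz

-- ===== PORT B =====
-- the while loop of Source B: state (survivors, n, best_len, best_start); lst[pos+n] and lst[h+n]
-- are read via pyGet? (both are in range whenever the guard holds and survivors ⊆ window);
-- survivors[0] on the known-non-empty nxt is pyGet? nxt 0
def find_lz_alt_loop (lst : List Int) (pos tlen : Int) (survivors : List Int)
    (n bestLen : Int) (bestStart : Option Int) : Int × Option Int :=
  if hg : n < tlen ∧ survivors ≠ [] then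
    let c := PySem.List.pyGet? lst (pos + n)
    let nxt := survivors.filter (fun h => PySem.List.pyGet? lst (h + n) == c)
    if nxt = [] then (bestLen, bestStart)
    else find_lz_alt_loop lst pos tlen nxt (n + 1) (n + 1) (PySem.List.pyGet? nxt 0)
  else (bestLen, bestStart)
termination_by (tlen - n).toNat
decreasing_by simp only [Int.lt_iff_add_one_le] at hg; omega

def find_lz_alt (lst : List Int) (pos : Int) : Option (Int × Int) :=
  if lst ≠ [] ∧ pos < (lst.length : Int) then
    let survivors := PySem.List.pyRange (max 0 (pos - 255)) pos 1
    let tlen := min 255 ((lst.length : Int) - pos)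
    let r := find_lz_alt_loop lst pos tlen survivors 0 0 none
    -- if best_len < 2: return None; else (pos - best_start, best_len)  (best_start is an int there)
    if r.1 < 2 then none else r.2.map (fun s => (pos - s, r.1))
  else none  -- the assert raises here; outside Pre_find_lz

-- ===== PRECONDITION & SPEC =====
-- A (and B) assert `lst and pos < len(lst)`: exactly these inputs return normally
def Pre_find_lz (lst : List Int) (pos : Int) : Prop :=
  1 ≤ (lst.length : Int) ∧ pos < (lst.length : Int)
instance (lst : List Int) (pos : Int) : Decidable (Pre_find_lz lst pos) := by
  unfold Pre_find_lz; infer_instance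

def pvWitness_find_lz : List Int × Int := ([1, 1, 2, 1, 1, 3], 3)

def Spec_find_lz (lst : List Int) (pos : Int) (out : Option (Int × Int)) : Prop := out = find_lz_alt lst pos
instance (lst : List Int) (pos : Int) (out : Option (Int × Int)) : Decidable (Spec_find_lz lst pos out) := by unfold Spec_find_lz; infer_instance

-- ===== CLAIM (what is proved, stated in full; the proofs are below) =====
def Claim_equal_find_lz : Prop := ∀ (lst : List Int) (pos : Int), Dom_find_lz lst pos → Pre_find_lz lst pos → Spec_find_lz lst pos (find_lz lst pos)

-- ===== LEMMAS AND PROOFS =====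

-- plain (uncapped) common-prefix length of two lists, the proof-side yardstick
def pvLcp : List Int → List Int → Nat
  | x :: a, y :: b => if x = y then pvLcp a b + 1 else 0
  | _, _ => 0

lemma pyGet?_of_lt (lst : List Int) (p : Int) (h0 : 0 ≤ p) (hl : p.toNat < lst.length) :
    PySem.List.pyGet? lst p = some lst[p.toNat] := by
  simp only [PySem.List.pyGet?, PySem.List.pyIdx?]
  rw [if_pos h0, if_pos (by omega)]
  simp [List.getElem?_eq_getElem hl]

lemma pyGet?_of_ge (lst : List Int) (p : Int) (h0 : 0 ≤ p) (hl : lst.length ≤ p.toNat) :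
    PySem.List.pyGet? lst p = none := by
  simp only [PySem.List.pyGet?, PySem.List.pyIdx?]
  rw [if_pos h0, if_neg (by omega)]
  rfl

lemma pvLcp_le_right : ∀ a b : List Int, pvLcp a b ≤ b.length := by
  intro a
  induction a with
  | nil => intro b; cases b <;> simp [pvLcp]
  | cons x a ih =>
    intro b
    cases b with
    | nil => simp [pvLcp]
    | cons y b =>
      by_cases h : x = y
      · rw [pvLcp, if_pos h]; simpa using ih b
      · rw [pvLcp, if_neg h]; simp

lemma pvLcp_succ_le : ∀ (n : Nat) (a b : List Int),
    n + 1 ≤ pvLcp a b ↔ (n ≤ pvLcp a b ∧ a[n]? = b[n]? ∧ (a[n]?).isSome) := by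
  intro n
  induction n with
  | zero =>
    intro a b
    cases a with
    | nil => simp [pvLcp]
    | cons x a =>
      cases b with
      | nil => simp [pvLcp]
      | cons y b =>
        by_cases h : x = y
        · subst h; rw [pvLcp, if_pos rfl]; simp
        · rw [pvLcp, if_neg h]
          simp only [List.getElem?_cons_zero, Option.isSome_some]
          constructor
          · omega
          · rintro ⟨-, he, -⟩; exact absurd (Option.some.inj he) h
  | succ n ih =>
    intro a b
    cases a with
    | nil => simp [pvLcp]
    | cons x a =>
      cases b with
      | nil => simp [pvLcp]
      | cons y b =>
        by_cases h : x = y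
        · rw [pvLcp, if_pos h]
          simp only [List.getElem?_cons_succ]
          constructor
          · intro hle
            obtain ⟨h1, h2, h3⟩ := (ih a b).mp (by omega)
            exact ⟨by omega, h2, h3⟩
          · rintro ⟨h1, h2, h3⟩
            have := (ih a b).mpr ⟨by omega, h2, h3⟩
            omega
        · rw [pvLcp, if_neg h]; omega

-- A's index-based while loop computes min 255 (count + lcp of the two suffixes)
lemma csl_eq_lcp (fuel : Nat) : ∀ (lst : List Int) (hay pos count : Int),
    (255 - count).toNat ≤ fuel → 0 ≤ hay → 0 ≤ pos → 0 ≤ count → count ≤ 255 →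
    find_lz_csl lst hay pos count
      = min 255 (count + (pvLcp (lst.drop hay.toNat) (lst.drop pos.toNat) : Int)) := by
  induction fuel with
  | zero =>
    intro lst hay pos count hf hh hp hc0 hc255
    have hc : count = 255 := by omega
    rw [find_lz_csl, dif_neg (by omega)]
    have := pvLcp (lst.drop hay.toNat) (lst.drop pos.toNat)
    omega
  | succ k ih =>
    intro lst hay pos count hf hh hp hc0 hc255
    by_cases hcond : count < 255 ∧ pos < (lst.length : Int) ∧
        PySem.List.pyGet? lst hay = PySem.List.pyGet? lst pos
    · obtain ⟨hc, hlen, heq⟩ := hcond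
      have hpl : pos.toNat < lst.length := by omega
      rw [pyGet?_of_lt lst pos hp hpl] at heq
      have hhl : hay.toNat < lst.length := by
        by_contra hcon
        rw [pyGet?_of_ge lst hay hh (by omega)] at heq
        simp at heq
      rw [pyGet?_of_lt lst hay hh hhl] at heq
      have hval : lst[hay.toNat] = lst[pos.toNat] := Option.some.inj heq
      rw [find_lz_csl, dif_pos ⟨hc, hlen, by
        rw [pyGet?_of_lt lst pos hp hpl, pyGet?_of_lt lst hay hh hhl, hval]⟩]
      rw [ih lst (hay + 1) (pos + 1) (count + 1) (by omega) (by omega) (by omega) (by omega) (by omega)]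
      rw [List.drop_eq_getElem_cons hhl, List.drop_eq_getElem_cons hpl, pvLcp, if_pos hval]
      have e1 : (hay + 1).toNat = hay.toNat + 1 := by omega
      have e2 : (pos + 1).toNat = pos.toNat + 1 := by omega
      rw [e1, e2]
      push_cast
      omega
    · rw [find_lz_csl, dif_neg hcond]
      push Not at hcond
      rcases Int.lt_or_le count 255 with hc | hc
      · rcases Nat.lt_or_ge pos.toNat lst.length with hpl | hpl
        · have hne := hcond hc (by omega)
          rcases Nat.lt_or_ge hay.toNat lst.length with hhl | hhl
          · rw [pyGet?_of_lt lst pos hp hpl, pyGet?_of_lt lst hay hh hhl] at hne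
            have hval : ¬ lst[hay.toNat] = lst[pos.toNat] := fun he => hne (by rw [he])
            rw [List.drop_eq_getElem_cons hhl, List.drop_eq_getElem_cons hpl, pvLcp, if_neg hval]
            omega
          · rw [List.drop_eq_nil_of_le hhl]
            have : pvLcp [] (lst.drop pos.toNat) = 0 := by
              cases lst.drop pos.toNat <;> rfl
            rw [this]; omega
        · rw [List.drop_eq_nil_of_le hpl]
          have : pvLcp (lst.drop hay.toNat) [] = 0 := by
            cases lst.drop hay.toNat <;> rfl
          rw [this]; omega
      · have hc' : count = 255 := by omega
        have := pvLcp (lst.drop hay.toNat) (lst.drop pos.toNat)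
        omega

-- abbreviation used by the lemmas: A's match length at window start h
def pvMle (lst : List Int) (pos h : Int) : Int := find_lz_csl lst h pos 0

lemma mle_min (lst : List Int) (pos h : Int) (hh : 0 ≤ h) (hp : 0 ≤ pos) :
    pvMle lst pos h = min 255 ((pvLcp (lst.drop h.toNat) (lst.drop pos.toNat) : Int)) := by
  unfold pvMle
  rw [csl_eq_lcp 255 lst h pos 0 (by omega) hh hp (by omega) (by omega)]
  simp

lemma mle_nonneg (lst : List Int) (pos h : Int) (hh : 0 ≤ h) (hp : 0 ≤ pos) :
    0 ≤ pvMle lst pos h := by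
  rw [mle_min lst pos h hh hp]
  have := pvLcp (lst.drop h.toNat) (lst.drop pos.toNat)
  omega

lemma mle_le_tlen (lst : List Int) (pos h : Int) (hh : 0 ≤ h) (hp : 0 ≤ pos)
    (hpl : pos ≤ (lst.length : Int)) :
    pvMle lst pos h ≤ min 255 ((lst.length : Int) - pos) := by
  rw [mle_min lst pos h hh hp]
  have h1 := pvLcp_le_right (lst.drop h.toNat) (lst.drop pos.toNat)
  rw [List.length_drop] at h1
  omega

-- one filtering step of B equals raising the required match length by one
lemma mle_succ_iff (lst : List Int) (pos h n : Int) (hh : 0 ≤ h) (hhp : h < pos)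
    (hn : 0 ≤ n) (hn255 : n < 255) (hnl : pos + n < (lst.length : Int)) :
    (n + 1 ≤ pvMle lst pos h ↔
      (n ≤ pvMle lst pos h ∧ PySem.List.pyGet? lst (h + n) = PySem.List.pyGet? lst (pos + n))) := by
  have hp : 0 ≤ pos := by omega
  have hpl : (pos + n).toNat < lst.length := by omega
  have hhl : (h + n).toNat < lst.length := by omega
  rw [mle_min lst pos h hh hp, pyGet?_of_lt lst (h + n) (by omega) hhl,
    pyGet?_of_lt lst (pos + n) (by omega) hpl]
  have hidx1 : (lst.drop h.toNat)[n.toNat]? = some lst[(h + n).toNat] := by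
    rw [List.getElem?_drop, List.getElem?_eq_getElem (by omega)]
    congr 1
    congr 1
    omega
  have hidx2 : (lst.drop pos.toNat)[n.toNat]? = some lst[(pos + n).toNat] := by
    rw [List.getElem?_drop, List.getElem?_eq_getElem (by omega)]
    congr 1
    congr 1
    omega
  have hiff := pvLcp_succ_le n.toNat (lst.drop h.toNat) (lst.drop pos.toNat)
  rw [hidx1, hidx2] at hiff
  simp only [Option.isSome_some, and_true, Option.some_inj] at hiff
  constructor
  · intro hle
    have h1 : (n.toNat : Int) + 1 ≤ (pvLcp (lst.drop h.toNat) (lst.drop pos.toNat) : Int) := by omega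
    have h2 := hiff.mp (by exact_mod_cast h1)
    refine ⟨by omega, by rw [h2.2]⟩
  · rintro ⟨h1, h2⟩
    have h1' : n.toNat ≤ pvLcp (lst.drop h.toNat) (lst.drop pos.toNat) := by omega
    have h3 := hiff.mpr ⟨h1', Option.some.inj h2⟩
    omega

-- "key of y is lexicographically at most the key of m", key = (length, distance)
def lzLe (y m : Int × Int) : Prop := y.2 < m.2 ∨ (y.2 = m.2 ∧ y.1 ≤ m.1)

def lzStep : Option (Int × Int) → Int × Int → Option (Int × Int)
  | none, x => some x
  | some m, x =>
    if (decide (m.2 < x.2) || !decide (x.2 < m.2) && decide (m.1 < x.1)) = true then some x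
    else some m

lemma max2?_eq_foldl (cands : List (Int × Int)) :
    PySem.List.max2? cands (fun ent => ent.2) (fun ent => ent.1) = cands.foldl lzStep none := by
  simp only [PySem.List.max2?]
  congr 1
  funext acc x
  cases acc <;> rfl

lemma lzStep_some (c x : Int × Int) :
    lzStep (some c) x = if c.2 < x.2 ∨ (c.2 = x.2 ∧ c.1 < x.1) then some x else some c := by
  simp only [lzStep, Bool.or_eq_true, Bool.and_eq_true, Bool.not_eq_true', decide_eq_true_eq,
    decide_eq_false_iff_not]
  split_ifs with h1 h2 h2 <;> first | rfl | (exfalso; omega)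

-- A's max(candidates, key): the fold returns the unique key-maximal element
lemma foldl_lzStep_eq (m : Int × Int) :
    ∀ (cands : List (Int × Int)) (acc : Option (Int × Int)),
    (∀ y ∈ cands, lzLe y m) →
    (acc = some m ∨ (m ∈ cands ∧ (acc = none ∨ ∃ c, acc = some c ∧ lzLe c m))) →
    cands.foldl lzStep acc = some m := by
  intro cands
  induction cands with
  | nil =>
    intro acc _ hinv
    rcases hinv with h | ⟨hm, _⟩
    · simpa using h
    · exact absurd hm (List.not_mem_nil)
  | cons x t ih =>
    intro acc hle hinv
    have hlex : lzLe x m := hle x List.mem_cons_self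
    have hlet : ∀ y ∈ t, lzLe y m := fun y hy => hle y (List.mem_cons_of_mem _ hy)
    rw [List.foldl_cons]
    rcases hinv with hacc | ⟨hm, hacc⟩
    · subst hacc
      have hkeep : lzStep (some m) x = some m := by
        rw [lzStep_some, if_neg]
        rcases hlex with h1 | ⟨h2, h3⟩ <;> (push Not; constructor <;> omega)
      rw [hkeep]
      exact ih (some m) hlet (Or.inl rfl)
    · rcases List.mem_cons.mp hm with hxm | hmt
      · subst hxm
        rcases hacc with hn | ⟨c, hc, hcle⟩
        · subst hn
          exact ih (some m) hlet (Or.inl rfl)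
        · subst hc
          by_cases hcx : c = m
          · subst hcx
            have hkeep : lzStep (some c) c = some c := by
              rw [lzStep_some, if_neg]; omega
            rw [hkeep]; exact ih (some c) hlet (Or.inl rfl)
          · have hrepl : lzStep (some c) m = some m := by
              rw [lzStep_some, if_pos]
              rcases hcle with h1 | ⟨h2, h3⟩
              · exact Or.inl h1
              · refine Or.inr ⟨h2, ?_⟩
                rcases lt_or_eq_of_le h3 with h4 | h4
                · exact h4
                · exact absurd (Prod.ext h4 h2) hcx
            rw [hrepl]
            exact ih (some m) hlet (Or.inl rfl)
      · rcases hacc with hn | ⟨c, hc, hcle⟩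
        · subst hn
          exact ih (some x) hlet (Or.inr ⟨hmt, Or.inr ⟨x, rfl, hlex⟩⟩)
        · subst hc
          rw [lzStep_some]
          split_ifs with hcond
          · exact ih (some x) hlet (Or.inr ⟨hmt, Or.inr ⟨x, rfl, hlex⟩⟩)
          · exact ih (some c) hlet (Or.inr ⟨hmt, Or.inr ⟨c, rfl, hcle⟩⟩)

-- running max of a projection; the attained form
lemma foldl_max_attained {f : Int → Int} :
    ∀ (l : List Int) (a : Int), l.foldl (fun b x => max b (f x)) a = a ∨
      ∃ x ∈ l, f x = l.foldl (fun b x => max b (f x)) a := by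
  intro l
  induction l with
  | nil => intro a; exact Or.inl rfl
  | cons h t ih =>
    intro a
    rw [List.foldl_cons]
    rcases ih (max a (f h)) with he | ⟨x, hx, he⟩
    · rw [he]
      rcases max_choice a (f h) with hm | hm
      · exact Or.inl hm
      · exact Or.inr ⟨h, List.mem_cons_self, hm.symm⟩
    · exact Or.inr ⟨x, List.mem_cons_of_mem _ hx, he⟩

-- head of a filtered ascending list is its minimum
lemma head?_sorted_le {p : Int → Bool} {l : List Int} (hpw : l.Pairwise (· < ·))
    {a x : Int} (hh : (l.filter p).head? = some a) (hx : x ∈ l.filter p) : a ≤ x := by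
  have hpwf : (l.filter p).Pairwise (· < ·) := hpw.filter p
  cases hf : l.filter p with
  | nil => rw [hf] at hx; exact absurd hx (List.not_mem_nil)
  | cons b t =>
    rw [hf] at hh hx hpwf
    have hb : b = a := by simpa using hh
    subst hb
    rcases List.mem_cons.mp hx with rfl | hxt
    · exact le_refl x
    · exact le_of_lt ((List.pairwise_cons.mp hpwf).1 x hxt)

lemma pyGet?_zero_head? (l : List Int) : PySem.List.pyGet? l 0 = l.head? := by
  cases l with
  | nil => rfl
  | cons x t => simp [PySem.List.pyGet?, PySem.List.pyIdx?]

-- the characterization of B's loop: started on the n-th survivor set with a valid state, it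
-- ends with the pair describing the maximal match length M over the window
lemma alt_loop_char (lst : List Int) (pos : Int) (hp : 0 < pos) (hlen : pos < (lst.length : Int))
    (M : Int)
    (hMle : ∀ h ∈ PySem.List.pyRange (max 0 (pos - 255)) pos 1, pvMle lst pos h ≤ M)
    (hMmem : 2 ≤ M → ∃ h ∈ PySem.List.pyRange (max 0 (pos - 255)) pos 1, pvMle lst pos h = M) :
    ∀ (fuel : Nat) (n bestLen : Int) (bestStart : Option Int),
      (min 255 ((lst.length : Int) - pos) - n).toNat ≤ fuel →
      0 ≤ n → n ≤ min 255 ((lst.length : Int) - pos) →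
      ((n = 0 ∧ bestLen = 0 ∧ bestStart = none) ∨
        (1 ≤ n ∧ ((PySem.List.pyRange (max 0 (pos - 255)) pos 1).filter
            (fun h => decide (n ≤ pvMle lst pos h))) ≠ [] ∧ bestLen = n ∧ bestStart =
          ((PySem.List.pyRange (max 0 (pos - 255)) pos 1).filter
            (fun h => decide (n ≤ pvMle lst pos h))).head?)) →
      (2 ≤ M → find_lz_alt_loop lst pos (min 255 ((lst.length : Int) - pos))
          ((PySem.List.pyRange (max 0 (pos - 255)) pos 1).filter
            (fun h => decide (n ≤ pvMle lst pos h))) n bestLen bestStart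
          = (M, ((PySem.List.pyRange (max 0 (pos - 255)) pos 1).filter
            (fun h => decide (M ≤ pvMle lst pos h))).head?)) ∧
      (M < 2 → (find_lz_alt_loop lst pos (min 255 ((lst.length : Int) - pos))
          ((PySem.List.pyRange (max 0 (pos - 255)) pos 1).filter
            (fun h => decide (n ≤ pvMle lst pos h))) n bestLen bestStart).1 < 2) := by
  have htl1 : 1 ≤ min 255 ((lst.length : Int) - pos) := by omega
  have hmemW : ∀ h ∈ PySem.List.pyRange (max 0 (pos - 255)) pos 1, 0 ≤ h ∧ h < pos := by
    intro h hh
    have := PySem.List.mem_pyRange_one.mp hh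
    omega
  -- exit when n has reached tlen with a non-empty survivor set
  have hexit : ∀ (bestLen : Int) (bestStart : Option Int),
      ((PySem.List.pyRange (max 0 (pos - 255)) pos 1).filter
        (fun h => decide (min 255 ((lst.length : Int) - pos) ≤ pvMle lst pos h))) ≠ [] →
      bestLen = min 255 ((lst.length : Int) - pos) →
      bestStart = ((PySem.List.pyRange (max 0 (pos - 255)) pos 1).filter
        (fun h => decide (min 255 ((lst.length : Int) - pos) ≤ pvMle lst pos h))).head? →
      (2 ≤ M → ((bestLen : Int), bestStart)
          = (M, ((PySem.List.pyRange (max 0 (pos - 255)) pos 1).filter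
            (fun h => decide (M ≤ pvMle lst pos h))).head?)) ∧
      (M < 2 → ((bestLen : Int), bestStart).1 < 2) := by
    intro bestLen bestStart hne hbl hbs
    obtain ⟨h0, hh0⟩ := List.exists_mem_of_ne_nil _ hne
    have hh0' := List.mem_filter.mp hh0
    have hh0W := (hmemW h0 hh0'.1)
    have h0le := mle_le_tlen lst pos h0 hh0W.1 (by omega) (by omega)
    have h0ge : min 255 ((lst.length : Int) - pos) ≤ pvMle lst pos h0 := by
      simpa using hh0'.2
    have hMge : min 255 ((lst.length : Int) - pos) ≤ M := by
      have := hMle h0 hh0'.1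
      omega
    constructor
    · intro h2M
      obtain ⟨hs, hsW, hsM⟩ := hMmem h2M
      have := mle_le_tlen lst pos hs (hmemW hs hsW).1 (by omega) (by omega)
      have hMtl : M = min 255 ((lst.length : Int) - pos) := by omega
      rw [hbl, hbs, hMtl]
    · intro h2M
      simp only [hbl]
      omega
  intro fuel
  induction fuel with
  | zero =>
    intro n bestLen bestStart hf hn0 hntl hinv
    have hn : n = min 255 ((lst.length : Int) - pos) := by omega
    rw [find_lz_alt_loop, dif_neg (by push Not; intro h; omega)]
    rcases hinv with ⟨he, _, _⟩ | ⟨h1, hne, hbl, hbs⟩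
    · omega
    · rw [hn] at hne hbs
      exact hexit bestLen bestStart hne (by omega) hbs
  | succ k ih =>
    intro n bestLen bestStart hf hn0 hntl hinv
    by_cases hg : n < min 255 ((lst.length : Int) - pos) ∧
        ((PySem.List.pyRange (max 0 (pos - 255)) pos 1).filter
          (fun h => decide (n ≤ pvMle lst pos h))) ≠ []
    · rw [find_lz_alt_loop, dif_pos hg]
      simp only []
      -- the byte-n filter on the n-th survivor set is the (n+1)-th survivor set
      have hnxt : ((PySem.List.pyRange (max 0 (pos - 255)) pos 1).filter
            (fun h => decide (n ≤ pvMle lst pos h))).filter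
            (fun h => PySem.List.pyGet? lst (h + n) == PySem.List.pyGet? lst (pos + n))
          = (PySem.List.pyRange (max 0 (pos - 255)) pos 1).filter
            (fun h => decide (n + 1 ≤ pvMle lst pos h)) := by
        rw [List.filter_filter]
        apply List.filter_congr
        intro h hh
        have hhW := hmemW h hh
        have hiff := mle_succ_iff lst pos h n hhW.1 hhW.2 hn0 (by omega) (by omega)
        rcases Decidable.em (PySem.List.pyGet? lst (h + n) = PySem.List.pyGet? lst (pos + n))
            with heq | hne
        · rcases Decidable.em (n ≤ pvMle lst pos h) with hle | hlt
          · simp [heq, hle, hiff.mpr ⟨hle, heq⟩]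
          · have hnot : ¬ (n + 1 ≤ pvMle lst pos h) := fun hc => hlt (hiff.mp hc).1
            simp [heq, hlt, hnot]
        · have hnot : ¬ (n + 1 ≤ pvMle lst pos h) := fun hc => hne (hiff.mp hc).2
          simp [hne, hnot]
      rw [hnxt]
      by_cases hnil : ((PySem.List.pyRange (max 0 (pos - 255)) pos 1).filter
          (fun h => decide (n + 1 ≤ pvMle lst pos h))) = []
      · rw [if_pos hnil]
        -- survivors at n exist, none at n + 1: the maximum is exactly n
        obtain ⟨h0, hh0⟩ := List.exists_mem_of_ne_nil _ hg.2
        have hh0' := List.mem_filter.mp hh0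
        have h0ge : n ≤ pvMle lst pos h0 := by simpa using hh0'.2
        have hub : ∀ h ∈ PySem.List.pyRange (max 0 (pos - 255)) pos 1,
            pvMle lst pos h ≤ n := by
          intro h hh
          by_contra hc
          exact (List.filter_eq_nil_iff.mp hnil) h hh (by simp; omega)
        constructor
        · intro h2M
          obtain ⟨hs, hsW, hsM⟩ := hMmem h2M
          have hMn : M ≤ n := hsM ▸ hub hs hsW
          have hnM : n ≤ M := le_trans h0ge (hMle h0 hh0'.1)
          have hMeq : M = n := by omega
          rcases hinv with ⟨he, _, _⟩ | ⟨h1, hne2, hbl, hbs⟩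
          · omega
          · rw [hbl, hbs, hMeq]
        · intro h2M
          rcases hinv with ⟨he, hbl, _⟩ | ⟨h1, hne2, hbl, hbs⟩
          · simp only [hbl]; omega
          · have := le_trans h0ge (hMle h0 hh0'.1)
            simp only [hbl]
            omega
      · rw [if_neg hnil]
        exact ih (n + 1) (n + 1) (PySem.List.pyGet? ((PySem.List.pyRange (max 0 (pos - 255)) pos 1).filter
            (fun h => decide (n + 1 ≤ pvMle lst pos h))) 0) (by omega) (by omega) (by omega)
          (Or.inr ⟨by omega, hnil, rfl, pyGet?_zero_head? _⟩)
    · rw [find_lz_alt_loop, dif_neg hg]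
      push Not at hg
      rcases hinv with ⟨he, hbl, hbs⟩ | ⟨h1, hne, hbl, hbs⟩
      · -- n = 0 and the full window is empty: impossible for 0 < pos
        exfalso
        subst he
        have hW : ((PySem.List.pyRange (max 0 (pos - 255)) pos 1).filter
            (fun h => decide ((0 : Int) ≤ pvMle lst pos h))) ≠ [] := by
          have hmem : max 0 (pos - 255) ∈ PySem.List.pyRange (max 0 (pos - 255)) pos 1 :=
            PySem.List.mem_pyRange_one.mpr ⟨le_refl _, by omega⟩
          intro hc
          exact (List.filter_eq_nil_iff.mp hc) _ hmem
            (by simpa using mle_nonneg lst pos (max 0 (pos - 255)) (by omega) (by omega))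
        exact hW (hg (by omega))
      · have hn : n = min 255 ((lst.length : Int) - pos) := by
          rcases Int.lt_or_le n (min 255 ((lst.length : Int) - pos)) with h | h
          · exact absurd (hg h) (by simpa using hne)
          · omega
        rw [hn] at hne hbs
        exact hexit bestLen bestStart hne (by omega) hbs

lemma csl_eq_mle (lst : List Int) (pos h : Int) : find_lz_csl lst h pos 0 = pvMle lst pos h := rfl

-- ===== VERDICT (by name: the statement is the Claim_ definition above) =====
theorem find_lz_spec : Claim_equal_find_lz := by
  intro lst pos _ hpre
  obtain ⟨h1len, hlen⟩ := hpre
  have hne : lst ≠ [] := by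
    intro h
    subst h
    simp at h1len
  unfold Spec_find_lz find_lz find_lz_alt
  rw [if_pos ⟨hne, hlen⟩, if_pos ⟨hne, hlen⟩]
  simp only []
  by_cases hp0 : pos ≤ 0
  · -- empty window: A folds over nothing, B's loop exits at once; both yield none
    rw [PySem.List.pyRange_one_eq_nil (show pos ≤ max 0 (pos - 255) by omega)]
    rw [List.foldl_nil, max2?_eq_foldl, List.foldl_nil]
    rw [find_lz_alt_loop, dif_neg (by simp)]
    norm_num
  · push Not at hp0
    have hmemW : ∀ h ∈ PySem.List.pyRange (max 0 (pos - 255)) pos 1, 0 ≤ h ∧ h < pos := by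
      intro h hh
      have := PySem.List.mem_pyRange_one.mp hh
      omega
    have hbound := PySem.List.le_foldl_max_int (PySem.List.pyRange (max 0 (pos - 255)) pos 1)
      (fun h => pvMle lst pos h) 0
    -- M is the maximal match length over the window
    set M := (PySem.List.pyRange (max 0 (pos - 255)) pos 1).foldl
      (fun a h => max a (pvMle lst pos h)) 0 with hM
    have hMle : ∀ h ∈ PySem.List.pyRange (max 0 (pos - 255)) pos 1, pvMle lst pos h ≤ M :=
      hbound.2
    have hM0 : 0 ≤ M := hbound.1
    have hMmem : 2 ≤ M → ∃ h ∈ PySem.List.pyRange (max 0 (pos - 255)) pos 1,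
        pvMle lst pos h = M := by
      intro h2
      rcases foldl_max_attained (f := fun h => pvMle lst pos h)
        (PySem.List.pyRange (max 0 (pos - 255)) pos 1) 0 with h0 | h
      · omega
      · exact h
    -- A: the appending loop is filter-then-map over the window
    rw [PySem.List.foldl_append_ite (fun hay => 2 ≤ find_lz_csl lst hay pos 0)
      (fun hay => (pos - hay, find_lz_csl lst hay pos 0)), List.nil_append]
    -- B: the initial survivor set is the window itself
    have hF0 : (PySem.List.pyRange (max 0 (pos - 255)) pos 1).filter
        (fun h => decide ((0 : Int) ≤ pvMle lst pos h))
        = PySem.List.pyRange (max 0 (pos - 255)) pos 1 := by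
      apply List.filter_eq_self.mpr
      intro h hh
      simpa using mle_nonneg lst pos h (hmemW h hh).1 (by omega)
    rw [show find_lz_alt_loop lst pos (min 255 ((lst.length : Int) - pos))
        (PySem.List.pyRange (max 0 (pos - 255)) pos 1) 0 0 none
        = find_lz_alt_loop lst pos (min 255 ((lst.length : Int) - pos))
          ((PySem.List.pyRange (max 0 (pos - 255)) pos 1).filter
            (fun h => decide ((0 : Int) ≤ pvMle lst pos h))) 0 0 none by rw [hF0]]
    have hchar := alt_loop_char lst pos hp0 hlen M hMle hMmem
      (min 255 ((lst.length : Int) - pos)).toNat 0 0 none (by omega) (by omega) (by omega)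
      (Or.inl ⟨rfl, rfl, rfl⟩)
    by_cases h2M : 2 ≤ M
    · -- a real candidate exists: both sides produce (pos - h*, M) for the minimal h* attaining M
      have hFMne : ((PySem.List.pyRange (max 0 (pos - 255)) pos 1).filter
          (fun h => decide (M ≤ pvMle lst pos h))) ≠ [] := by
        obtain ⟨hs, hsW, hsM⟩ := hMmem h2M
        exact List.ne_nil_of_mem (List.mem_filter.mpr ⟨hsW, by simp; omega⟩)
      rcases hFM : ((PySem.List.pyRange (max 0 (pos - 255)) pos 1).filter
          (fun h => decide (M ≤ pvMle lst pos h))) with _ | ⟨hstar, rest⟩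
      · exact absurd hFM hFMne
      have hstarmem : hstar ∈ (PySem.List.pyRange (max 0 (pos - 255)) pos 1).filter
          (fun h => decide (M ≤ pvMle lst pos h)) := by
        rw [hFM]; exact List.mem_cons_self
      have hstar' := List.mem_filter.mp hstarmem
      have hstarW := hstar'.1
      have hstarM : pvMle lst pos hstar = M := by
        have h1 : M ≤ pvMle lst pos hstar := by simpa using hstar'.2
        have h2 := hMle hstar hstarW
        omega
      rw [hchar.1 h2M, hFM]
      rw [if_neg (by simp only []; omega)]
      simp only [List.head?_cons, Option.map_some]
      -- A's max over the candidates is exactly that entry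
      rw [max2?_eq_foldl]
      rw [foldl_lzStep_eq (pos - hstar, M)]
      · intro y hy
        obtain ⟨h, hh, rfl⟩ := List.mem_map.mp hy
        simp only [csl_eq_mle]
        have hh' := List.mem_filter.mp hh
        have hhW := hh'.1
        have hhle := hMle h hhW
        rcases Int.lt_or_le (pvMle lst pos h) M with hlt | hge
        · exact Or.inl hlt
        · have heq : pvMle lst pos h = M := by omega
          have hmemFM : h ∈ (PySem.List.pyRange (max 0 (pos - 255)) pos 1).filter
              (fun h => decide (M ≤ pvMle lst pos h)) :=
            List.mem_filter.mpr ⟨hhW, by simp; omega⟩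
          have hle := head?_sorted_le (PySem.List.pairwise_lt_pyRange_one _ _)
            (by rw [hFM]; rfl) hmemFM
          exact Or.inr ⟨heq, by omega⟩
      · refine Or.inr ⟨?_, Or.inl rfl⟩
        refine List.mem_map.mpr ⟨hstar, List.mem_filter.mpr ⟨hstarW, by
          simp only [csl_eq_mle, decide_eq_true_eq]; omega⟩, ?_⟩
        rw [csl_eq_mle, hstarM]
    · -- no candidate of length ≥ 2 anywhere: both sides yield none
      push Not at h2M
      rw [if_pos (hchar.2 (by omega))]
      have hFnil : ((PySem.List.pyRange (max 0 (pos - 255)) pos 1).filter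
          (fun h => decide (2 ≤ find_lz_csl lst h pos 0))) = [] := by
        apply List.filter_eq_nil_iff.mpr
        intro h hh
        have := hMle h hh
        simp only [csl_eq_mle, decide_eq_true_eq]
        omega
      rw [hFnil, List.map_nil, max2?_eq_foldl, List.foldl_nil]
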